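-- pv_equiv track=rewrite | github.com/mbt1/LanguageLearnApp | server/srs/difficulty.py | difficulty_exercise_type
-- ===== SOURCE A (Python) =====
-- DIFFICULTY_CONFIG: list[dict] = [
--     {"level": 10, "exercise_type": "translate", "presentation": "mc",      "min_stability": 0.0},
--     {"level": 20, "exercise_type": "translate", "presentation": "arrange", "min_stability": 1.0},
--     {"level": 30, "exercise_type": "cloze",     "presentation": "mc",      "min_stability": 3.0},
--     {"level": 40, "exercise_type": "cloze",     "presentation": "typing",  "min_stability": 10.0},
--     {"level": 50, "exercise_type": "translate",  "presentation": "typing",  "min_stability": 30.0},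
-- ]
--
-- _LEVEL_MAP: dict[int, dict] = {entry["level"]: entry for entry in DIFFICULTY_CONFIG}
--
-- def difficulty_exercise_type(level: int) -> str:
--     """Return the exercise_type string for a difficulty level."""
--     entry = _LEVEL_MAP.get(level)
--     if entry:
--         return entry["exercise_type"]
--     # Fall back to nearest level below
--     for entry in reversed(DIFFICULTY_CONFIG):
--         if entry["level"] <= level:
--             return entry["exercise_type"]
--     return DIFFICULTY_CONFIG[0]["exercise_type"]
-- ===== SOURCE B (Python) =====
-- _LEVELS = [10, 20, 30, 40, 50]
-- _TYPES = ["translate", "translate", "cloze", "cloze", "translate"]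
--
-- def _bisect_right(xs, x, lo, hi):
--     while lo < hi:
--         mid = (lo + hi) // 2
--         if x < xs[mid]:
--             hi = mid
--         else:
--             lo = mid + 1
--     return lo
--
-- def difficulty_exercise_type(level: int) -> str:
--     """Return the exercise_type string for a difficulty level."""
--     i = _bisect_right(_LEVELS, level, 0, len(_LEVELS))
--     if i == 0:
--         return _TYPES[0]
--     return _TYPES[i - 1]
-- ===== Notes on version B (the rewrite author's own statement) =====
-- stated objective: idiomatic
-- what changed: Replaced the dict lookup plus reversed linear scan with a binary search (bisect_right) over the ascending threshold levels, indexing a parallel list of exercise types.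
import Mathlib
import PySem

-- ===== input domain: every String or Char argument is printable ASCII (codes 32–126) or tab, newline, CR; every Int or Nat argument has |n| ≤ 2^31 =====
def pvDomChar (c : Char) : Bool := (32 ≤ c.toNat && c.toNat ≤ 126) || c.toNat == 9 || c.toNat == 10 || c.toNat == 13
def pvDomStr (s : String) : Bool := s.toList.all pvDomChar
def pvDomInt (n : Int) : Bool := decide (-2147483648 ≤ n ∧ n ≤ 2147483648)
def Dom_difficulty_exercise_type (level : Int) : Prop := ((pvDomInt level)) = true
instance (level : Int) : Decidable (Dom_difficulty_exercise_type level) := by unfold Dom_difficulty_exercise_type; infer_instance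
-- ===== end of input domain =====

-- B replaces A's dict lookup + reversed linear scan with a binary search over the ascending
-- threshold levels (idiomatic rewrite; same return value for every int level).

-- ===== PORT A =====
-- DIFFICULTY_CONFIG as (level, exercise_type, presentation); the unused float field
-- min_stability is dropped (the function never reads it, so this is exact).
def pvConfigA : List (Int × String × String) :=
  [(10, "translate", "mc"), (20, "translate", "arrange"), (30, "cloze", "mc"),
   (40, "cloze", "typing"), (50, "translate", "typing")]

-- _LEVEL_MAP = {entry["level"]: entry for entry in DIFFICULTY_CONFIG}
def pvLevelMapA : PySem.Dict Int (String × String) :=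
  pvConfigA.foldl (fun d e => d.insert e.1 e.2) (PySem.Dict.empty)

-- for entry in reversed(DIFFICULTY_CONFIG): if entry["level"] <= level: return entry["exercise_type"]
def pvFallbackA (level : Int) : List (Int × String × String) → String
  | [] => (pvConfigA.headD (0, "", "")).2.1   -- return DIFFICULTY_CONFIG[0]["exercise_type"]
  | e :: rest => if e.1 ≤ level then e.2.1 else pvFallbackA level rest

def difficulty_exercise_type (level : Int) : String :=
  match PySem.Dict.get? pvLevelMapA level with
  | some entry => entry.1        -- a config entry is a non-empty dict, hence truthy
  | none => pvFallbackA level pvConfigA.reverse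

-- ===== PORT B =====
def pvLevelsB : List Int := [10, 20, 30, 40, 50]
def pvTypesB : List String := ["translate", "translate", "cloze", "cloze", "translate"]

-- _bisect_right(xs, x, lo, hi): the while loop of Source B as recursion on hi - lo
def pvBisectRight (xs : List Int) (x : Int) (lo hi : Nat) : Nat :=
  if _h : lo < hi then
    let mid := (lo + hi) / 2
    if x < xs.getD mid 0 then pvBisectRight xs x lo mid
    else pvBisectRight xs x (mid + 1) hi
  else lo
termination_by hi - lo
decreasing_by all_goals omega

def difficulty_exercise_type_alt (level : Int) : String :=
  let i := pvBisectRight pvLevelsB level 0 pvLevelsB.length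
  if i = 0 then pvTypesB.getD 0 ""
  else pvTypesB.getD (i - 1) ""

-- ===== PRECONDITION & SPEC =====
def Spec_difficulty_exercise_type (level : Int) (out : String) : Prop := out = difficulty_exercise_type_alt level
instance (level : Int) (out : String) : Decidable (Spec_difficulty_exercise_type level out) := by unfold Spec_difficulty_exercise_type; infer_instance

-- ===== CLAIM (what is proved, stated in full; the proofs are below) =====
def Claim_equal_difficulty_exercise_type : Prop := ∀ (level : Int), Dom_difficulty_exercise_type level → Spec_difficulty_exercise_type level (difficulty_exercise_type level)

-- ===== LEMMAS AND PROOFS =====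

-- B's binary search over [10,20,30,40,50] lands on the rightmost insertion point.
lemma pv_br_eval (x : Int) : pvBisectRight pvLevelsB x 0 5 =
    if x < 10 then 0 else if x < 20 then 1 else if x < 30 then 2
    else if x < 40 then 3 else if x < 50 then 4 else 5 := by
  rw [pvBisectRight.eq_def]
  norm_num [pvLevelsB]
  rw [pvBisectRight.eq_def, pvBisectRight.eq_def]
  norm_num [pvLevelsB]
  rw [pvBisectRight.eq_def, pvBisectRight.eq_def, pvBisectRight.eq_def, pvBisectRight.eq_def]
  norm_num [pvLevelsB]
  rw [pvBisectRight.eq_def, pvBisectRight.eq_def]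
  norm_num [pvLevelsB]
  have b33 : pvBisectRight [10, 20, 30, 40, 50] x 3 3 = 3 := by
    rw [pvBisectRight.eq_def]; norm_num
  have b44 : pvBisectRight [10, 20, 30, 40, 50] x 4 4 = 4 := by
    rw [pvBisectRight.eq_def]; norm_num
  simp only [b33, b44]
  split_ifs <;> omega

-- A's dict lookup misses whenever level is none of the five configured levels.
lemma pv_get_none (level : Int) (h1 : level ≠ 10) (h2 : level ≠ 20) (h3 : level ≠ 30)
    (h4 : level ≠ 40) (h5 : level ≠ 50) :
    PySem.Dict.get? pvLevelMapA level = none := by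
  simp [pvLevelMapA, pvConfigA, PySem.Dict.get?, PySem.Dict.insert, PySem.Dict.empty]
  omega

-- ===== VERDICT (by name: the statement is the Claim_ definition above) =====
theorem difficulty_exercise_type_spec : Claim_equal_difficulty_exercise_type := by
  intro level _
  unfold Spec_difficulty_exercise_type
  by_cases e1 : level = 10
  case pos =>
    subst e1
    unfold difficulty_exercise_type difficulty_exercise_type_alt
    rw [show pvLevelsB.length = 5 from rfl, pv_br_eval]
    norm_num [pvLevelMapA, pvConfigA, PySem.Dict.get?, PySem.Dict.insert, PySem.Dict.empty, pvTypesB]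
  by_cases e2 : level = 20
  case pos =>
    subst e2
    unfold difficulty_exercise_type difficulty_exercise_type_alt
    rw [show pvLevelsB.length = 5 from rfl, pv_br_eval]
    norm_num [pvLevelMapA, pvConfigA, PySem.Dict.get?, PySem.Dict.insert, PySem.Dict.empty, pvTypesB]
  by_cases e3 : level = 30
  case pos =>
    subst e3
    unfold difficulty_exercise_type difficulty_exercise_type_alt
    rw [show pvLevelsB.length = 5 from rfl, pv_br_eval]
    norm_num [pvLevelMapA, pvConfigA, PySem.Dict.get?, PySem.Dict.insert, PySem.Dict.empty, pvTypesB]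
  by_cases e4 : level = 40
  case pos =>
    subst e4
    unfold difficulty_exercise_type difficulty_exercise_type_alt
    rw [show pvLevelsB.length = 5 from rfl, pv_br_eval]
    norm_num [pvLevelMapA, pvConfigA, PySem.Dict.get?, PySem.Dict.insert, PySem.Dict.empty, pvTypesB]
  by_cases e5 : level = 50
  case pos =>
    subst e5
    unfold difficulty_exercise_type difficulty_exercise_type_alt
    rw [show pvLevelsB.length = 5 from rfl, pv_br_eval]
    norm_num [pvLevelMapA, pvConfigA, PySem.Dict.get?, PySem.Dict.insert, PySem.Dict.empty, pvTypesB]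
  unfold difficulty_exercise_type difficulty_exercise_type_alt
  rw [pv_get_none level e1 e2 e3 e4 e5]
  show pvFallbackA level pvConfigA.reverse = _
  have hlen : pvLevelsB.length = 5 := rfl
  rw [hlen, pv_br_eval]
  simp only [pvFallbackA, pvConfigA, List.reverse, List.reverseAux]
  split_ifs <;> first | rfl | omega | exact False.elim ‹False›
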